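-- pv_equiv track=rewrite | github.com/efran45/jira-split-analyzer | jira_split_analyzer.py | analyze_user_split_impact
-- ===== SOURCE A (Python) =====
-- def analyze_user_split_impact(
--     site_a: set[str],
--     site_b: set[str],
--     user_data: dict,
-- ) -> dict:
--     """
--     Classify every user and group as belonging to Site A only, Site B only,
--     or spanning both sites (requires provisioning on both).
--
--     Returns a dict with six sets keyed by descriptive names.
--     """
--     users_a: set[str] = set()
--     users_b: set[str] = set()
--     groups_a: set[str] = set()
--     groups_b: set[str] = set()
--
--     for proj in site_a:
--         if proj in user_data:
--             users_a |= user_data[proj]["users"]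
--             groups_a |= user_data[proj]["groups"]
--     for proj in site_b:
--         if proj in user_data:
--             users_b |= user_data[proj]["users"]
--             groups_b |= user_data[proj]["groups"]
--
--     return {
--         "users_site_a_only":  users_a - users_b,
--         "users_site_b_only":  users_b - users_a,
--         "users_on_both":      users_a & users_b,
--         "groups_site_a_only": groups_a - groups_b,
--         "groups_site_b_only": groups_b - groups_a,
--         "groups_on_both":     groups_a & groups_b,
--     }
-- ===== SOURCE B (Python) =====
-- def analyze_user_split_impact(
--     site_a: set[str],
--     site_b: set[str],
--     user_data: dict,
-- ) -> dict:
--     """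
--     Classify every user and group by the sites they appear on, using a single
--     flag map (bit 1 = site A, bit 2 = site B) per user / group instead of
--     four intermediate sets and set algebra.
--     """
--     user_sites: dict = {}
--     group_sites: dict = {}
--     for flag, sites in ((1, site_a), (2, site_b)):
--         for proj in sites:
--             if proj in user_data:
--                 for u in user_data[proj]["users"]:
--                     user_sites[u] = user_sites.get(u, 0) | flag
--                 for g in user_data[proj]["groups"]:
--                     group_sites[g] = group_sites.get(g, 0) | flag
--     return {
--         "users_site_a_only":  {u for u, f in user_sites.items() if f == 1},
--         "users_site_b_only":  {u for u, f in user_sites.items() if f == 2},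
--         "users_on_both":      {u for u, f in user_sites.items() if f == 3},
--         "groups_site_a_only": {g for g, f in group_sites.items() if f == 1},
--         "groups_site_b_only": {g for g, f in group_sites.items() if f == 2},
--         "groups_on_both":     {g for g, f in group_sites.items() if f == 3},
--     }
-- ===== Notes on version B (the rewrite author's own statement) =====
-- stated objective: alternative
-- what changed: Instead of accumulating four per-site sets and combining them with set difference/intersection, B builds one flag map per category (user/group -> bitmask of sites seen) in a single tagged pass and reads each of the six output sets off the flag values.
import Mathlib
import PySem

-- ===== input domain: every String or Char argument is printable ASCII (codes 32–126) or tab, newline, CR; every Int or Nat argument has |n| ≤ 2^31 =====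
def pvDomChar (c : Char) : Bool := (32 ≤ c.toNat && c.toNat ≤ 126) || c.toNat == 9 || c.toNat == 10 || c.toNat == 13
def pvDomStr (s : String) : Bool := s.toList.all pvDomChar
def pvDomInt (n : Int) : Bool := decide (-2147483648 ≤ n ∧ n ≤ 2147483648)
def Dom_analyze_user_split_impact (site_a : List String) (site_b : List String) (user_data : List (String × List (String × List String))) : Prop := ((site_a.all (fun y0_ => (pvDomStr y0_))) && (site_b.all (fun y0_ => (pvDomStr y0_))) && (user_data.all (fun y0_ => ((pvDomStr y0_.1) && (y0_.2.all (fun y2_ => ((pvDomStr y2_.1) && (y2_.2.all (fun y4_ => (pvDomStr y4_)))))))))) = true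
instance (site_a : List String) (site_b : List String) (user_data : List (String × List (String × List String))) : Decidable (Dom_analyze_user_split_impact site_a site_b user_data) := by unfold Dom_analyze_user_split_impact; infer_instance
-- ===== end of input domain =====

-- ===== PORT A =====
-- B replaces A's four per-site sets and set algebra by one flag map per category (alternative decomposition, same cost).
def analyze_user_split_impact (site_a : List String) (site_b : List String) (user_data : List (String × List (String × List String))) : List (String × List String) :=
  let ua_ga := site_a.foldl (fun (st : PySem.Set String × PySem.Set String) proj =>
    if (PySem.Dict.mk user_data).contains proj then
      (PySem.Set.union st.1 ((PySem.Dict.mk ((PySem.Dict.mk user_data).getD proj [])).getD "users" []),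
       PySem.Set.union st.2 ((PySem.Dict.mk ((PySem.Dict.mk user_data).getD proj [])).getD "groups" []))
    else st) (PySem.Set.empty, PySem.Set.empty)
  let ub_gb := site_b.foldl (fun (st : PySem.Set String × PySem.Set String) proj =>
    if (PySem.Dict.mk user_data).contains proj then
      (PySem.Set.union st.1 ((PySem.Dict.mk ((PySem.Dict.mk user_data).getD proj [])).getD "users" []),
       PySem.Set.union st.2 ((PySem.Dict.mk ((PySem.Dict.mk user_data).getD proj [])).getD "groups" []))
    else st) (PySem.Set.empty, PySem.Set.empty)
  [("users_site_a_only",  PySem.Set.diff  ua_ga.1 ub_gb.1),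
   ("users_site_b_only",  PySem.Set.diff  ub_gb.1 ua_ga.1),
   ("users_on_both",      PySem.Set.inter ua_ga.1 ub_gb.1),
   ("groups_site_a_only", PySem.Set.diff  ua_ga.2 ub_gb.2),
   ("groups_site_b_only", PySem.Set.diff  ub_gb.2 ua_ga.2),
   ("groups_on_both",     PySem.Set.inter ua_ga.2 ub_gb.2)]

-- ===== PORT B =====
-- d[x] = d.get(x, 0) | flag
def pvFlagUpd (flag : Int) (d : PySem.Dict String Int) (x : String) : PySem.Dict String Int :=
  d.insert x (PySem.Int.bor (d.getD x 0) flag)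

-- one pass of B's outer loop body for a given (flag, sites) pair
def pvPhase (flag : Int) (user_data : List (String × List (String × List String))) (sites : List String)
    (st : PySem.Dict String Int × PySem.Dict String Int) : PySem.Dict String Int × PySem.Dict String Int :=
  sites.foldl (fun st proj =>
    if (PySem.Dict.mk user_data).contains proj then
      (((PySem.Dict.mk ((PySem.Dict.mk user_data).getD proj [])).getD "users" []).foldl (pvFlagUpd flag) st.1,
       ((PySem.Dict.mk ((PySem.Dict.mk user_data).getD proj [])).getD "groups" []).foldl (pvFlagUpd flag) st.2)
    else st) st

-- {k for k, f in d.items() if f == flag}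
def pvPick (d : PySem.Dict String Int) (flag : Int) : PySem.Set String :=
  PySem.Set.ofList ((d.items.filter (fun kv => kv.2 == flag)).map (fun kv => kv.1))

def analyze_user_split_impact_alt (site_a : List String) (site_b : List String) (user_data : List (String × List (String × List String))) : List (String × List String) :=
  let st := pvPhase 2 user_data site_b (pvPhase 1 user_data site_a (PySem.Dict.empty, PySem.Dict.empty))
  [("users_site_a_only",  pvPick st.1 1),
   ("users_site_b_only",  pvPick st.1 2),
   ("users_on_both",      pvPick st.1 3),
   ("groups_site_a_only", pvPick st.2 1),
   ("groups_site_b_only", pvPick st.2 2),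
   ("groups_on_both",     pvPick st.2 3)]

-- ===== PRECONDITION & SPEC =====
-- Pre_ excludes exactly the inputs on which A raises KeyError: a project of site_a/site_b present in
-- user_data whose per-project dict lacks the "users" or "groups" key.
def Pre_analyze_user_split_impact (site_a : List String) (site_b : List String) (user_data : List (String × List (String × List String))) : Prop :=
  ((site_a ++ site_b).all (fun p =>
    ((PySem.Dict.mk user_data).get? p).all (fun v =>
      (PySem.Dict.mk v).contains "users" && (PySem.Dict.mk v).contains "groups"))) = true
instance (site_a : List String) (site_b : List String) (user_data : List (String × List (String × List String))) : Decidable (Pre_analyze_user_split_impact site_a site_b user_data) := by unfold Pre_analyze_user_split_impact; infer_instance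

def pvWitness_analyze_user_split_impact : List String × List String × (List (String × List (String × List String))) :=
  (["p1", "p3"], ["p2"], [("p1", [("users", ["u1", "u2"]), ("groups", ["g1"])]), ("p2", [("users", ["u2"]), ("groups", [])])])

def Spec_analyze_user_split_impact (site_a : List String) (site_b : List String) (user_data : List (String × List (String × List String))) (out : List (String × List String)) : Prop := out = analyze_user_split_impact_alt site_a site_b user_data
instance (site_a : List String) (site_b : List String) (user_data : List (String × List (String × List String))) (out : List (String × List String)) : Decidable (Spec_analyze_user_split_impact site_a site_b user_data out) := by unfold Spec_analyze_user_split_impact; infer_instance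

-- ===== CLAIM (what is proved, stated in full; the proofs are below) =====
def Claim_equal_analyze_user_split_impact : Prop := ∀ (site_a : List String) (site_b : List String) (user_data : List (String × List (String × List String))), Dom_analyze_user_split_impact site_a site_b user_data → Pre_analyze_user_split_impact site_a site_b user_data → Spec_analyze_user_split_impact site_a site_b user_data (analyze_user_split_impact site_a site_b user_data)

-- ===== LEMMAS AND PROOFS =====

-- a fold over a pair state whose branches act componentwise is a pair of folds
theorem pv_foldl_pair_if {α β γ : Type} (c : γ → Bool) (F : α → γ → α) (G : β → γ → β)
    (l : List γ) (a : α) (b : β) :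
    l.foldl (fun st p => if c p then (F st.1 p, G st.2 p) else st) (a, b)
      = (l.foldl (fun s p => if c p then F s p else s) a,
         l.foldl (fun s p => if c p then G s p else s) b) := by
  induction l generalizing a b with
  | nil => rfl
  | cons x t ih => by_cases hx : c x = true <;> simp [hx, ih]

-- A's running union over a list of blocks is one Set.update over the flattened list
theorem pv_foldl_union (g : String → List String) (l : List String) (s : PySem.Set String) :
    l.foldl (fun s p => PySem.Set.union s (g p)) s = PySem.Set.update s (l.flatMap g) := by
  induction l generalizing s with
  | nil => rfl
  | cons x t ih =>
    show t.foldl _ (PySem.Set.union s (g x)) = _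
    rw [ih]
    show PySem.Set.update (PySem.Set.union s (g x)) (t.flatMap g) = _
    simp [PySem.Set.update, PySem.Set.union, List.flatMap_cons, List.foldl_append]

-- Set.update keeps the old part and appends the genuinely new elements
theorem pv_update_append (s : PySem.Set String) (l : List String) :
    PySem.Set.update s l = s ++ (PySem.Set.update [] l).filter (fun x => !(s.contains x)) := by
  induction l generalizing s with
  | nil => simp [PySem.Set.update]
  | cons x t ih =>
    show PySem.Set.update (PySem.Set.add s x) t = _
    have hrhs : PySem.Set.update ([] : List String) (x :: t) = PySem.Set.update [x] t := by
      show PySem.Set.update (PySem.Set.add [] x) t = _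
      simp [PySem.Set.add]
    rw [ih, hrhs, ih ([x])]
    rw [List.filter_append, List.filter_filter]
    simp only [PySem.Set.add, PySem.Set.contains]
    by_cases hx : x ∈ s
    · rw [if_pos (List.contains_iff_mem.mpr hx)]
      have h1 : List.filter (fun y => !List.contains s y) [x] = [] := by
        simp [hx]
      rw [h1, List.nil_append]
      congr 1
      apply List.filter_congr
      intro a _
      by_cases hsa : a ∈ s
      · simp [hsa]
      · have hax : ¬ (a = x) := fun e => hsa (e ▸ hx)
        simp [hsa, hax]
    · rw [if_neg (fun h => hx (List.contains_iff_mem.mp h))]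
      have h1 : List.filter (fun y => !List.contains s y) [x] = [x] := by
        simp [hx]
      rw [h1, List.append_assoc]
      congr 1
      congr 1
      apply List.filter_congr
      intro a _
      by_cases hsa : a ∈ s <;> by_cases hax : a = x <;>
        simp [hsa, hax]

-- keys and key-uniqueness of the flag-update loop
theorem pv_keys_orflag (f : Int) (l : List String) (d : PySem.Dict String Int) :
    (l.foldl (pvFlagUpd f) d).keys = PySem.Set.update d.keys l := by
  rw [show l.foldl (pvFlagUpd f) d
        = l.foldl (fun d x => d.insert x (PySem.Int.bor (d.getD x 0) f)) d from rfl,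
     PySem.Dict.keys_foldl_insert]

theorem pv_nodup_orflag (f : Int) (l : List String) (d : PySem.Dict String Int)
    (h : d.keys.Nodup) : (l.foldl (pvFlagUpd f) d).keys.Nodup :=
  PySem.Dict.nodup_keys_foldl_insert l _ d h

-- the flag-update loop's value table
theorem pv_getD_orflag (f : Int) (hf : f = 1 ∨ f = 2) (l : List String) (d : PySem.Dict String Int)
    (hv : ∀ k, d.getD k 0 = 0 ∨ d.getD k 0 = 1 ∨ d.getD k 0 = 2 ∨ d.getD k 0 = 3) (u : String) :
    (l.foldl (pvFlagUpd f) d).getD u 0 = if u ∈ l then PySem.Int.bor (d.getD u 0) f else d.getD u 0 := by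
  induction l generalizing d with
  | nil => simp
  | cons x t ih =>
    show (t.foldl (pvFlagUpd f) (pvFlagUpd f d x)).getD u 0 = _
    have hv' : ∀ k, (pvFlagUpd f d x).getD k 0 = 0 ∨ (pvFlagUpd f d x).getD k 0 = 1 ∨
        (pvFlagUpd f d x).getD k 0 = 2 ∨ (pvFlagUpd f d x).getD k 0 = 3 := by
      intro k
      unfold pvFlagUpd
      rw [PySem.Dict.getD_insert]
      split_ifs with hkx
      · rcases hv x with h | h | h | h <;> rcases hf with hf | hf <;> rw [h, hf] <;> decide
      · exact hv k
    rw [ih (pvFlagUpd f d x) hv']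
    have hgx : (pvFlagUpd f d x).getD u 0
        = if u = x then PySem.Int.bor (d.getD x 0) f else d.getD u 0 := by
      unfold pvFlagUpd; rw [PySem.Dict.getD_insert]
    by_cases hut : u ∈ t <;> by_cases hux : u = x
    · subst hux
      rw [if_pos hut, hgx, if_pos rfl, if_pos (List.mem_cons_self)]
      rcases hv u with h | h | h | h <;> rcases hf with hf | hf <;> rw [h, hf] <;> decide
    · rw [if_pos hut, hgx, if_neg hux, if_pos (List.mem_cons_of_mem x hut)]
    · subst hux
      rw [if_neg hut, hgx, if_pos rfl, if_pos (List.mem_cons_self)]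
    · rw [if_neg hut, hgx, if_neg hux, if_neg (by simp [hux, hut])]

-- core: the three outputs of the flag map equal A's set algebra, for any flattened lists La, Lb
theorem pv_core (La Lb : List String) :
    pvPick (Lb.foldl (pvFlagUpd 2) (La.foldl (pvFlagUpd 1) PySem.Dict.empty)) 1
        = PySem.Set.diff (PySem.Set.update [] La) (PySem.Set.update [] Lb)
    ∧ pvPick (Lb.foldl (pvFlagUpd 2) (La.foldl (pvFlagUpd 1) PySem.Dict.empty)) 2
        = PySem.Set.diff (PySem.Set.update [] Lb) (PySem.Set.update [] La)
    ∧ pvPick (Lb.foldl (pvFlagUpd 2) (La.foldl (pvFlagUpd 1) PySem.Dict.empty)) 3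
        = PySem.Set.inter (PySem.Set.update [] La) (PySem.Set.update [] Lb) := by
  set d1 := La.foldl (pvFlagUpd 1) PySem.Dict.empty with hd1
  set d2 := Lb.foldl (pvFlagUpd 2) d1 with hd2
  set ua := PySem.Set.update ([] : List String) La with hua
  set ub := PySem.Set.update ([] : List String) Lb with hub
  have hmua : ∀ y, y ∈ ua ↔ y ∈ La := by
    intro y; rw [hua, PySem.Set.mem_update]; simp
  have hmub : ∀ y, y ∈ ub ↔ y ∈ Lb := by
    intro y; rw [hub, PySem.Set.mem_update]; simp
  have hnd1 : d1.keys.Nodup := pv_nodup_orflag 1 La _ (by simp [PySem.Dict.keys_empty])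
  have hnd : d2.keys.Nodup := pv_nodup_orflag 2 Lb _ hnd1
  have hkeys : d2.keys = PySem.Set.update ua Lb := by
    rw [hd2, pv_keys_orflag, hd1, pv_keys_orflag, PySem.Dict.keys_empty]
  have hget1 : ∀ u, d1.getD u 0 = if u ∈ La then 1 else 0 := by
    intro u
    rw [hd1, pv_getD_orflag 1 (Or.inl rfl) La _ (by intro k; left; simp [PySem.Dict.getD_empty]) u]
    simp only [PySem.Dict.getD_empty]
    split_ifs <;> decide
  have hget : ∀ u, d2.getD u 0
      = if u ∈ La then (if u ∈ Lb then 3 else 1) else (if u ∈ Lb then 2 else 0) := by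
    intro u
    rw [hd2, pv_getD_orflag 2 (Or.inr rfl) Lb d1 (by intro k; rw [hget1 k]; split_ifs <;> simp) u]
    rw [hget1 u]
    by_cases h1 : u ∈ La <;> by_cases h2 : u ∈ Lb <;> simp [h1, h2] <;> decide
  have hpick : ∀ fl, pvPick d2 fl = d2.keys.filter (fun k => d2.getD k 0 == fl) := by
    intro fl
    unfold pvPick
    rw [PySem.Dict.items_eq_map_keys d2 hnd 0, List.filter_map, List.map_map]
    have hnodf : (List.filter ((fun kv : String × Int => kv.2 == fl) ∘ fun k => (k, d2.getD k 0)) d2.keys).Nodup :=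
      hnd.filter _
    rw [show ((fun kv : String × Int => kv.1) ∘ fun k => (k, d2.getD k 0)) = id from rfl, List.map_id]
    rw [PySem.Set.ofList_eq_self_of_nodup _ hnodf]
    rfl
  have hsplit : d2.keys = ua ++ ub.filter (fun x => !(PySem.Set.contains ua x)) := by
    rw [hkeys, pv_update_append]
  have htailmem : ∀ a ∈ ub.filter (fun x => !(PySem.Set.contains ua x)), a ∈ Lb ∧ a ∉ La := by
    intro a ha
    have h := List.mem_filter.mp ha
    simp only [PySem.Set.contains, Bool.not_eq_true', List.contains_eq_mem, decide_eq_false_iff_not] at h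
    exact ⟨(hmub a).mp h.1, fun hla => h.2 ((hmua a).mpr hla)⟩
  refine ⟨?_, ?_, ?_⟩
  · rw [hpick, hsplit, List.filter_append]
    have h2 : (ub.filter (fun x => !(PySem.Set.contains ua x))).filter (fun k => d2.getD k 0 == 1) = [] := by
      rw [List.filter_eq_nil_iff]
      intro a ha
      obtain ⟨hb, hna⟩ := htailmem a ha
      rw [hget a, if_neg hna, if_pos hb]
      decide
    rw [h2, List.append_nil]
    show _ = ua.filter (fun x => !(PySem.Set.contains ub x))
    apply List.filter_congr
    intro a ha
    have hla := (hmua a).mp ha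
    rw [hget a, if_pos hla]
    by_cases hb : a ∈ Lb
    · rw [if_pos hb]
      have hm : a ∈ ub := (hmub a).mpr hb
      simp [hm]
    · rw [if_neg hb]
      have hm : a ∉ ub := fun h => hb ((hmub a).mp h)
      simp [hm]
  · rw [hpick, hsplit, List.filter_append]
    have h1 : ua.filter (fun k => d2.getD k 0 == 2) = [] := by
      rw [List.filter_eq_nil_iff]
      intro a ha
      rw [hget a, if_pos ((hmua a).mp ha)]
      split_ifs <;> decide
    rw [h1, List.nil_append]
    show _ = ub.filter (fun x => !(PySem.Set.contains ua x))
    rw [List.filter_filter]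
    apply List.filter_congr
    intro a ha
    by_cases hma : a ∈ ua
    · simp [hma]
    · have hnla : a ∉ La := fun h => hma ((hmua a).mpr h)
      rw [hget a, if_neg hnla, if_pos ((hmub a).mp ha)]
      simp [hma]
  · rw [hpick, hsplit, List.filter_append]
    have h2 : (ub.filter (fun x => !(PySem.Set.contains ua x))).filter (fun k => d2.getD k 0 == 3) = [] := by
      rw [List.filter_eq_nil_iff]
      intro a ha
      obtain ⟨hb, hna⟩ := htailmem a ha
      rw [hget a, if_neg hna, if_pos hb]
      decide
    rw [h2, List.append_nil]
    show _ = ua.filter (fun x => PySem.Set.contains ub x)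
    apply List.filter_congr
    intro a ha
    have hla := (hmua a).mp ha
    rw [hget a, if_pos hla]
    by_cases hb : a ∈ Lb
    · rw [if_pos hb]
      have hm : a ∈ ub := (hmub a).mpr hb
      simp [hm]
    · rw [if_neg hb]
      have hm : a ∉ ub := fun h => hb ((hmub a).mp h)
      simp [hm]

-- ===== VERDICT (by name: the statement is the Claim_ definition above) =====
theorem analyze_user_split_impact_spec : Claim_equal_analyze_user_split_impact := by
  intro site_a site_b user_data _ _
  unfold Spec_analyze_user_split_impact
  unfold analyze_user_split_impact analyze_user_split_impact_alt pvPhase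
  rw [pv_foldl_pair_if (c := fun proj => (PySem.Dict.mk user_data).contains proj)
        (F := fun s p => PySem.Set.union s ((PySem.Dict.mk ((PySem.Dict.mk user_data).getD p [])).getD "users" []))
        (G := fun s p => PySem.Set.union s ((PySem.Dict.mk ((PySem.Dict.mk user_data).getD p [])).getD "groups" [])) site_a,
      pv_foldl_pair_if (c := fun proj => (PySem.Dict.mk user_data).contains proj)
        (F := fun s p => PySem.Set.union s ((PySem.Dict.mk ((PySem.Dict.mk user_data).getD p [])).getD "users" []))
        (G := fun s p => PySem.Set.union s ((PySem.Dict.mk ((PySem.Dict.mk user_data).getD p [])).getD "groups" [])) site_b,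
      pv_foldl_pair_if (c := fun proj => (PySem.Dict.mk user_data).contains proj)
        (F := fun d p => ((PySem.Dict.mk ((PySem.Dict.mk user_data).getD p [])).getD "users" []).foldl (pvFlagUpd 1) d)
        (G := fun d p => ((PySem.Dict.mk ((PySem.Dict.mk user_data).getD p [])).getD "groups" []).foldl (pvFlagUpd 1) d) site_a,
      pv_foldl_pair_if (c := fun proj => (PySem.Dict.mk user_data).contains proj)
        (F := fun d p => ((PySem.Dict.mk ((PySem.Dict.mk user_data).getD p [])).getD "users" []).foldl (pvFlagUpd 2) d)
        (G := fun d p => ((PySem.Dict.mk ((PySem.Dict.mk user_data).getD p [])).getD "groups" []).foldl (pvFlagUpd 2) d) site_b]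
  simp only [PySem.List.foldl_if_eq_foldl_filter, pv_foldl_union, List.foldl_flatMap.symm]
  simp only [show (PySem.Set.empty : PySem.Set String) = [] from rfl]
  obtain ⟨hu1, hu2, hu3⟩ := pv_core
    ((site_a.filter (fun proj => (PySem.Dict.mk user_data).contains proj)).flatMap
      (fun p => (PySem.Dict.mk ((PySem.Dict.mk user_data).getD p [])).getD "users" []))
    ((site_b.filter (fun proj => (PySem.Dict.mk user_data).contains proj)).flatMap
      (fun p => (PySem.Dict.mk ((PySem.Dict.mk user_data).getD p [])).getD "users" []))
  obtain ⟨hg1, hg2, hg3⟩ := pv_core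
    ((site_a.filter (fun proj => (PySem.Dict.mk user_data).contains proj)).flatMap
      (fun p => (PySem.Dict.mk ((PySem.Dict.mk user_data).getD p [])).getD "groups" []))
    ((site_b.filter (fun proj => (PySem.Dict.mk user_data).contains proj)).flatMap
      (fun p => (PySem.Dict.mk ((PySem.Dict.mk user_data).getD p [])).getD "groups" []))
  simp only [hu1, hu2, hu3, hg1, hg2, hg3]
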